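-- pv_equiv track=rewrite | github.com/mouredev/roadmap-retos-programacion | Roadmap/48 - ÁRBOL DE NAVIDAD/python/cdryampi.py | gen_arbol
-- ===== SOURCE A (Python) =====
-- def gen_arbol(altura:int):
--     base_arbol = [[" " for _ in range(2*altura-1)] for _ in range(altura)]
--     for fila in range(altura):
--         num_sim = 2 * fila + 1
--         inicio = (2*altura-1-num_sim) // 2
--         fin =inicio + num_sim
--         for col in range(inicio, fin):
--             base_arbol[fila][col] = '*'
--     return base_arbol
-- ===== SOURCE B (Python) =====
-- def gen_arbol(altura: int):
--     filas = []
--     row = [" "] * (2 * altura - 1)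
--     left = altura - 1
--     right = altura - 1
--     for _ in range(altura):
--         row = row.copy()
--         row[left] = "*"
--         row[right] = "*"
--         filas.append(row)
--         left -= 1
--         right += 1
--     return filas
-- ===== Notes on version B (the rewrite author's own statement) =====
-- stated objective: alternative
-- what changed: Replaces the allocate-blank-grid-then-overwrite double loop with a two-pointer incremental build: one evolving row starts blank, each iteration sets the cells at moving left/right pointers to '*' and appends a copy, so each row is derived from the previous one with no inner column loop and no per-row start/end arithmetic.
import Mathlib
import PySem

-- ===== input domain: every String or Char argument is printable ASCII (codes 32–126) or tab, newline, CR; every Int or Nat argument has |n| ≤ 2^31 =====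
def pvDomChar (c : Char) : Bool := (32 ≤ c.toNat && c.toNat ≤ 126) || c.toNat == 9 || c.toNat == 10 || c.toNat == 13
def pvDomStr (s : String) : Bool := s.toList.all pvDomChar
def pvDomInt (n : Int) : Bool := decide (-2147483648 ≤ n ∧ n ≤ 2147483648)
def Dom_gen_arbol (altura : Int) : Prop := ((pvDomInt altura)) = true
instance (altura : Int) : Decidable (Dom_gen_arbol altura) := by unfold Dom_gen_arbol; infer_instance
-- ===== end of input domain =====

-- B builds the tree with two moving pointers: one evolving row starts blank and each
-- iteration sets the cells at the left/right pointers to '*' and appends a copy, so each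
-- row is derived from the previous one (objective: an alternative algorithm, no inner
-- column loop and no per-row start/end arithmetic).

-- ===== PORT A =====
-- inner 'for col in range(inicio, fin)' loop of A (mutates row `fila` of the grid)
def fillRowA (altura fila : Int) (g : List (List String)) : List (List String) :=
  let num_sim := 2 * fila + 1
  let inicio := PySem.Int.floordiv (2 * altura - 1 - num_sim) 2
  let fin := inicio + num_sim
  (PySem.List.pyRange inicio fin 1).foldl
    (fun g col => g.set fila.toNat ((g.getD fila.toNat []).set col.toNat "*")) g

def gen_arbol (altura : Int) : List (List String) :=
  let base := (PySem.List.pyRange 0 altura 1).map (fun _ =>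
    (PySem.List.pyRange 0 (2 * altura - 1) 1).map (fun _ => " "))
  (PySem.List.pyRange 0 altura 1).foldl (fun g fila => fillRowA altura fila g) base

-- ===== PORT B =====
-- loop body of B: set the two pointed cells, append a copy, move the pointers
def stepB (st : List (List String) × List String × Int × Int) (_ : Int) :
    List (List String) × List String × Int × Int :=
  let row := (st.2.1.set st.2.2.1.toNat "*").set st.2.2.2.toNat "*"
  (st.1 ++ [row], row, st.2.2.1 - 1, st.2.2.2 + 1)

def gen_arbol_alt (altura : Int) : List (List String) :=
  ((PySem.List.pyRange 0 altura 1).foldl stepB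
    ([], List.replicate (2 * altura - 1).toNat " ", altura - 1, altura - 1)).1

-- ===== PRECONDITION & SPEC =====
def Spec_gen_arbol (altura : Int) (out : List (List String)) : Prop := out = gen_arbol_alt altura
instance (altura : Int) (out : List (List String)) : Decidable (Spec_gen_arbol altura out) := by unfold Spec_gen_arbol; infer_instance

-- ===== CLAIM (what is proved, stated in full; the proofs are below) =====
def Claim_equal_gen_arbol : Prop := ∀ (altura : Int), Dom_gen_arbol altura → Spec_gen_arbol altura (gen_arbol altura)

-- ===== LEMMAS AND PROOFS =====

-- the row at index f of the height-n tree, in closed form (proof vocabulary only)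
def pvRowB (n f : Nat) : List String :=
  List.replicate (n - 1 - f) " " ++ List.replicate (2 * f + 1) "*" ++ List.replicate (n - 1 - f) " "

lemma pvPyRange_nil {a b : Int} (h : b ≤ a) : PySem.List.pyRange a b 1 = [] := by
  simp only [PySem.List.pyRange]
  norm_num
  intro h'
  omega

-- the inner column loop only touches row i of the grid
lemma pvInnerLift (cols : List Int) (i : Nat) :
    ∀ (g : List (List String)), i < g.length →
    cols.foldl (fun g col => g.set i ((g.getD i []).set col.toNat "*")) g
      = g.set i (cols.foldl (fun r col => r.set col.toNat "*") (g.getD i [])) := by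
  induction cols with
  | nil =>
      intro g hg
      simp only [List.foldl_nil]
      rw [List.getD_eq_getElem _ _ hg, List.set_getElem_self hg]
  | cons c cs ih =>
      intro g hg
      simp only [List.foldl_cons]
      rw [ih _ (by simpa using hg), List.set_set]
      congr 1
      have hq : (g.set i ((g.getD i []).set c.toNat "*")).getD i []
          = (g.getD i []).set c.toNat "*" := by
        rw [List.getD_eq_getElem _ _ (by simpa using hg), List.getElem_set_self]
      rw [hq]

-- filling columns [s, s+m) of a blank tail with '*'
lemma pvFill (m : Nat) : ∀ (k s : Nat) (pre : List String), pre.length = s →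
    (PySem.List.pyRange (s : Int) ((s : Int) + (m : Int)) 1).foldl
        (fun r col => r.set col.toNat "*") (pre ++ List.replicate (m + k) " ")
      = pre ++ List.replicate m "*" ++ List.replicate k " " := by
  induction m with
  | zero =>
      intro k s pre hpre
      rw [pvPyRange_nil (by omega)]
      simp
  | succ m ih =>
      intro k s pre hpre
      rw [PySem.List.pyRange_one_cons (by omega)]
      simp only [List.foldl_cons]
      have hset : (pre ++ List.replicate (m + 1 + k) " ").set (s : Int).toNat "*"
          = (pre ++ ["*"]) ++ List.replicate (m + k) " " := by
        have : List.replicate (m + 1 + k) " " = " " :: List.replicate (m + k) (" " : String) := by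
          simp [List.replicate_succ, Nat.add_right_comm]
        rw [this, Int.toNat_natCast, ← hpre, List.set_append_right _ _ (le_refl _),
            Nat.sub_self, List.set_cons_zero, List.append_cons]
      rw [hset]
      have hcast : (s : Int) + 1 = ((s + 1 : Nat) : Int) := by push_cast; ring
      have hcast2 : (s : Int) + ((m + 1 : Nat) : Int) = ((s + 1 : Nat) : Int) + ((m : Nat) : Int) := by
        push_cast; ring
      rw [hcast2, hcast, ih k (s + 1) (pre ++ ["*"]) (by simp [hpre])]
      simp [List.replicate_succ, List.append_assoc]

-- what A's inner loop does to a grid whose row f is still blank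
lemma pvFillRowA (n f : Nat) (hf : f < n) (g : List (List String)) (hg : g.length = n)
    (hrow : g.getD f [] = List.replicate (2 * n - 1) " ") :
    fillRowA (n : Int) (f : Int) g = g.set f (pvRowB n f) := by
  unfold fillRowA
  have h1 : PySem.Int.floordiv (2 * (n : Int) - 1 - (2 * (f : Int) + 1)) 2
      = ((n - 1 - f : Nat) : Int) := by
    rw [PySem.Int.floordiv_eq_ediv_of_pos (by norm_num)]
    push_cast [Nat.cast_sub (by omega : f ≤ n - 1), Nat.cast_sub (by omega : 1 ≤ n)]
    omega
  simp only [h1, Int.toNat_natCast]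
  have hlt : f < g.length := by omega
  rw [pvInnerLift _ f g hlt]
  congr 1
  have h2 : ((n - 1 - f : Nat) : Int) + (2 * (f : Int) + 1)
      = ((n - 1 - f : Nat) : Int) + ((2 * f + 1 : Nat) : Int) := by push_cast; ring
  rw [hrow, h2]
  have h3 : List.replicate (2 * n - 1) (" " : String)
      = List.replicate (n - 1 - f) " " ++ List.replicate ((2 * f + 1) + (n - 1 - f)) " " := by
    have he : 2 * n - 1 = (n - 1 - f) + ((2 * f + 1) + (n - 1 - f)) := by omega
    rw [he, List.replicate_add]
  rw [h3,
      pvFill (2 * f + 1) (n - 1 - f) (n - 1 - f) (List.replicate (n - 1 - f) " ") (by simp)]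
  rfl

-- the outer row loop: already-built rows `done`, blank rows still to fill
lemma pvOuter (n c f : Nat) (done : List (List String))
    (hd : done.length = f) (hn : f + c = n) :
    (PySem.List.pyRange (f : Int) (n : Int) 1).foldl
        (fun g fila => fillRowA (n : Int) fila g)
        (done ++ List.replicate c (List.replicate (2 * n - 1) " "))
      = done ++ (List.range' f c).map (pvRowB n) := by
  induction c generalizing f done with
  | zero =>
      rw [pvPyRange_nil (by omega)]
      simp
  | succ c ih =>
      rw [PySem.List.pyRange_one_cons (by exact_mod_cast (by omega : f < n))]
      simp only [List.foldl_cons]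
      have hrow : (done ++ List.replicate (c + 1) (List.replicate (2 * n - 1) (" " : String))).getD f []
          = List.replicate (2 * n - 1) " " := by
        rw [List.getD_eq_getElem _ _ (by simp; omega),
            List.getElem_append_right (by omega)]
        simp [hd]
      rw [pvFillRowA n f (by omega) _ (by simp; omega) hrow]
      have hset : (done ++ List.replicate (c + 1) (List.replicate (2 * n - 1) (" " : String))).set f (pvRowB n f)
          = (done ++ [pvRowB n f]) ++ List.replicate c (List.replicate (2 * n - 1) " ") := by
        rw [List.replicate_succ, ← hd, List.set_append_right _ _ (le_refl _), Nat.sub_self,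
            List.set_cons_zero, List.append_cons]
      rw [hset]
      have hcast : (f : Int) + 1 = ((f + 1 : Nat) : Int) := by push_cast; ring
      rw [hcast, ih (f + 1) (done ++ [pvRowB n f]) (by simp [hd]) (by omega)]
      simp [List.range'_succ]

-- A's grid in closed form
lemma pvAclosed (n : Nat) : gen_arbol (n : Int) = (List.range n).map (pvRowB n) := by
  unfold gen_arbol
  by_cases hn : n = 0
  · subst hn; rw [pvPyRange_nil (by norm_num)]; rfl
  · have hbase : (PySem.List.pyRange 0 (n : Int) 1).map (fun _ =>
        (PySem.List.pyRange 0 (2 * (n : Int) - 1) 1).map (fun _ => (" " : String)))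
        = List.replicate n (List.replicate (2 * n - 1) " ") := by
      have h2 : 2 * (n : Int) - 1 = ((2 * n - 1 : Nat) : Int) := by
        push_cast [Nat.cast_sub (by omega : 1 ≤ 2 * n)]; ring
      rw [h2, PySem.List.pyRange_zero_natCast, PySem.List.pyRange_zero_natCast]
      simp [List.map_map, List.eq_replicate_iff]
    simp only [hbase]
    have := pvOuter n n 0 [] rfl (by omega)
    simp only [Nat.cast_zero, List.nil_append] at this
    rw [this, ← List.range_eq_range']

-- the row fed into iteration f: blank for f = 0, otherwise the previously emitted row
def pvPrev (n f : Nat) : List String :=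
  if f = 0 then List.replicate (2 * n - 1) " " else pvRowB n (f - 1)

lemma pvRowB_length (n f : Nat) : (pvRowB n f).length = (n - 1 - f) + (2 * f + 1) + (n - 1 - f) := by
  unfold pvRowB; simp; omega

lemma pvRowB_get (n f i : Nat) (hf : f < n) (hi : i < 2 * n - 1) :
    (pvRowB n f).getD i " " = if n - 1 - f ≤ i ∧ i ≤ n - 1 + f then "*" else " " := by
  unfold pvRowB
  rw [List.getD_eq_getElem _ _ (by simp; omega)]
  simp only [List.getElem_append, List.getElem_replicate, List.length_replicate, List.length_append]
  split_ifs <;> first | rfl | omega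

lemma pvPrev_length (n f : Nat) (hf : f ≤ n) (hn : 0 < n) : (pvPrev n f).length = 2 * n - 1 := by
  unfold pvPrev
  split
  · simp
  · rw [pvRowB_length]; omega

lemma pvPrev_get (n f i : Nat) (hf : f < n) (hi : i < 2 * n - 1) :
    (pvPrev n f).getD i " " = if n - f ≤ i ∧ i + 2 ≤ n + f then "*" else " " := by
  unfold pvPrev
  rcases Nat.eq_zero_or_pos f with h0 | h0
  · subst h0
    rw [if_pos rfl, List.getD_eq_getElem _ _ (by simp; omega), List.getElem_replicate,
        if_neg (by omega)]
  · rw [if_neg (by omega), pvRowB_get n (f - 1) i (by omega) hi]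
    split_ifs <;> first | rfl | omega

-- setting the two pointed cells of the incoming row yields the closed-form row f
lemma pvSetStar (n f : Nat) (hf : f < n) :
    ((pvPrev n f).set (n - 1 - f) "*").set (n - 1 + f) "*" = pvRowB n f := by
  have hlp : (pvPrev n f).length = 2 * n - 1 := pvPrev_length n f (by omega) (by omega)
  apply List.ext_getElem
  · simp [hlp, pvRowB_length]; omega
  · intro i hi1 hi2
    have hi : i < 2 * n - 1 := by simpa [hlp] using hi1
    have hr := pvRowB_get n f i hf hi
    have hp := pvPrev_get n f i hf hi
    rw [List.getD_eq_getElem _ _ hi2] at hr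
    rw [List.getD_eq_getElem _ _ (by rw [hlp]; exact hi)] at hp
    rw [hr, List.getElem_set, List.getElem_set, hp]
    split_ifs <;> first | rfl | omega

-- the two-pointer loop, from iteration f on
lemma pvLoopB (n : Nat) : ∀ c f, f + c = n →
    ((PySem.List.pyRange (f : Int) (n : Int) 1).foldl stepB
        ((List.range f).map (pvRowB n), pvPrev n f, (n : Int) - 1 - (f : Int), (n : Int) - 1 + (f : Int))).1
      = (List.range n).map (pvRowB n) := by
  intro c
  induction c with
  | zero =>
      intro f hf
      rw [pvPyRange_nil (by omega)]
      simp only [List.foldl_nil]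
      rw [(by omega : f = n)]
  | succ c ih =>
      intro f hf
      rw [PySem.List.pyRange_one_cons (by exact_mod_cast (by omega : f < n))]
      simp only [List.foldl_cons]
      have hL : ((n : Int) - 1 - (f : Int)).toNat = n - 1 - f := by omega
      have hR : ((n : Int) - 1 + (f : Int)).toNat = n - 1 + f := by omega
      have hrow : stepB ((List.range f).map (pvRowB n), pvPrev n f, (n : Int) - 1 - (f : Int), (n : Int) - 1 + (f : Int)) (f : Int)
          = ((List.range (f+1)).map (pvRowB n), pvPrev n (f+1), (n : Int) - 1 - ((f+1 : Nat) : Int), (n : Int) - 1 + ((f+1 : Nat) : Int)) := by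
        unfold stepB
        simp only [hL, hR, pvSetStar n f (by omega)]
        refine Prod.ext ?_ (Prod.ext ?_ (Prod.ext ?_ ?_)) <;> simp [List.range_succ, pvPrev]
        · ring
        · ring
      rw [hrow, (by push_cast; ring : (f : Int) + 1 = ((f + 1 : Nat) : Int))]
      exact ih (f + 1) (by omega)

-- B's grid in closed form
lemma pvBclosed (n : Nat) : gen_arbol_alt (n : Int) = (List.range n).map (pvRowB n) := by
  unfold gen_arbol_alt
  have hinit : (2 * (n : Int) - 1).toNat = 2 * n - 1 := by omega
  have h0 : ((0 : Nat) : Int) = (0 : Int) := rfl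
  have := pvLoopB n n 0 (by omega)
  simp only [Nat.cast_zero, List.range_zero, List.map_nil] at this
  rw [hinit]
  have hprev : pvPrev n 0 = List.replicate (2 * n - 1) " " := by simp [pvPrev]
  rw [← hprev]
  have hl : (n : Int) - 1 = (n : Int) - 1 - (0:Int) := by ring
  calc ((PySem.List.pyRange 0 (n:Int) 1).foldl stepB ([], pvPrev n 0, (n:Int) - 1, (n:Int) - 1)).1
      = ((PySem.List.pyRange ((0:Nat):Int) (n:Int) 1).foldl stepB ([], pvPrev n 0, (n:Int) - 1 - ((0:Nat):Int), (n:Int) - 1 + ((0:Nat):Int))).1 := by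
        norm_num
    _ = (List.range n).map (pvRowB n) := this

-- ===== VERDICT (by name: the statement is the Claim_ definition above) =====
theorem gen_arbol_spec : Claim_equal_gen_arbol := by
  intro altura _
  unfold Spec_gen_arbol
  by_cases hpos : altura ≤ 0
  · unfold gen_arbol gen_arbol_alt
    rw [pvPyRange_nil hpos]
    simp
  · obtain ⟨n, rfl⟩ : ∃ n : Nat, altura = (n : Int) :=
      ⟨altura.toNat, (Int.toNat_of_nonneg (by omega)).symm⟩
    rw [pvAclosed, pvBclosed]
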